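-- pv_equiv track=rewrite | github.com/akikuno/DAJIN2 | src/DAJIN2/core/consensus/sv_annotator.py | get_end_of_deletion_indices
-- ===== SOURCE A (Python) =====
-- def get_end_of_deletion_indices(sv_midsv_tag: list[str]) -> list[int]:
--     """Retrieve the indices marking the end of deletion regions."""
--     index_end_of_deletion = []
--     is_prev_del = False
--
--     for i, tag in enumerate(sv_midsv_tag):
--         if tag.startswith("-"):
--             is_prev_del = True
--         elif is_prev_del:
--             index_end_of_deletion.append(i)
--             is_prev_del = False
--
--     return index_end_of_deletion
-- ===== SOURCE B (Python) =====
-- def get_end_of_deletion_indices(sv_midsv_tag: list[str]) -> list[int]: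
--     """Retrieve the indices marking the end of deletion regions.
--
--     Run-length decomposition: consume the deletion-status list run by run
--     (maximal blocks of equal status); the end of every deletion run that is
--     not at the end of the list is an end-of-deletion index.
--     """
--     flags = [t.startswith("-") for t in sv_midsv_tag]
--     out = []
--     pos = 0
--     while flags:
--         f = flags[0]
--         n = 1
--         while n < len(flags) and flags[n] == f:
--             n += 1
--         pos += n
--         flags = flags[n:]
--         if f and flags:
--             out.append(pos)
--     return out
-- ===== Notes on version B (the rewrite author's own statement) =====
-- stated objective: alternative
-- what changed: Replaced the per-element state-machine scan with a run-length decomposition: the list is consumed run by run (maximal blocks of equal deletion status) and the cumulative length after each non-final deletion run is emitted.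
import Mathlib
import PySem

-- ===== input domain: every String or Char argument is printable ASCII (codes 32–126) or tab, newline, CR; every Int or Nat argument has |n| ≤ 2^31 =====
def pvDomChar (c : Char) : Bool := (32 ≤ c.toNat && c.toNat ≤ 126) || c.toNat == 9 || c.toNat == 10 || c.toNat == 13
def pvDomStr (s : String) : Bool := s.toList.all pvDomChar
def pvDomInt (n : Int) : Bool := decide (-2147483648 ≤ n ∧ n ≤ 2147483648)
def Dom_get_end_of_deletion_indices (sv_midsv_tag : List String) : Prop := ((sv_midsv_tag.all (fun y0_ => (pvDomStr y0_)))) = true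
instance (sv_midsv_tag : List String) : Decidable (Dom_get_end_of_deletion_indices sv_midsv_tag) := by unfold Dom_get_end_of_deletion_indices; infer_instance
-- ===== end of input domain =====

-- B replaces A's per-element state-machine scan by a run-length decomposition:
-- the list is consumed run by run and the cumulative length after each
-- non-final deletion run is emitted (alternative; same O(n) cost).

-- ===== PORT A =====
-- A's for-loop over enumerate with state (accumulated indices, is_prev_del flag).
def get_end_of_deletion_indices (sv_midsv_tag : List String) : List Int :=
  ((PySem.List.enumerate sv_midsv_tag).foldl
    (fun (st : List Int × Bool) (p : Int × String) =>
      if PySem.Str.startswith p.2 "-" then (st.1, true)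
      else if st.2 then (st.1 ++ [p.1], false)
      else st)
    ([], false)).1

-- ===== PORT B =====
-- Source B's while-loop: take the leading run (inner while counts equal elements),
-- advance pos by the run length, drop the run, emit pos if the run was a
-- deletion run and something remains.
def pvScanRuns (pos : Int) (flags : List Bool) : List Int :=
  match flags with
  | [] => []
  | f :: fs =>
    let n : Int := 1 + (fs.takeWhile (fun x => x == f)).length
    let rest := fs.dropWhile (fun x => x == f)
    if f && !rest.isEmpty then (pos + n) :: pvScanRuns (pos + n) rest
    else pvScanRuns (pos + n) rest
termination_by flags.length
decreasing_by
  all_goals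
    exact Nat.lt_succ_of_le (List.length_dropWhile_le _ _)

def get_end_of_deletion_indices_alt (sv_midsv_tag : List String) : List Int :=
  pvScanRuns 0 (sv_midsv_tag.map (fun t => PySem.Str.startswith t "-"))

-- ===== PRECONDITION & SPEC =====
def Spec_get_end_of_deletion_indices (sv_midsv_tag : List String) (out : List Int) : Prop := out = get_end_of_deletion_indices_alt sv_midsv_tag
instance (sv_midsv_tag : List String) (out : List Int) : Decidable (Spec_get_end_of_deletion_indices sv_midsv_tag out) := by unfold Spec_get_end_of_deletion_indices; infer_instance

-- ===== CLAIM (what is proved, stated in full; the proofs are below) =====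
def Claim_equal_get_end_of_deletion_indices : Prop := ∀ (sv_midsv_tag : List String), Dom_get_end_of_deletion_indices sv_midsv_tag → Spec_get_end_of_deletion_indices sv_midsv_tag (get_end_of_deletion_indices sv_midsv_tag)

-- ===== LEMMAS AND PROOFS =====

-- Characterisation of A: the falling-edge indices of a boolean list, scanned
-- from index i with incoming flag b.
def pvEdges (i : Int) (b : Bool) : List Bool → List Int
  | [] => []
  | x :: xs =>
    if x then pvEdges (i + 1) true xs
    else if b then i :: pvEdges (i + 1) false xs
    else pvEdges (i + 1) false xs

theorem pvA_eq_edges (f : String → Bool) (ts : List String) (i : Int) (b : Bool) (acc : List Int) :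
    ((PySem.List.enumerate ts i).foldl
      (fun (st : List Int × Bool) (p : Int × String) =>
        if f p.2 then (st.1, true)
        else if st.2 then (st.1 ++ [p.1], false)
        else st)
      (acc, b)).1 = acc ++ pvEdges i b (ts.map f) := by
  induction ts generalizing i b acc with
  | nil => simp [PySem.List.enumerate_nil, pvEdges]
  | cons t ts ih =>
    simp only [PySem.List.enumerate_cons, List.foldl_cons, List.map_cons, pvEdges]
    by_cases h : f t = true
    · simp [h, ih]
    · simp only [Bool.not_eq_true] at h
      cases b with
      | false => simp [h, ih]
      | true => simp [h, ih]

-- A run of trues is absorbed by pvEdges with incoming flag true.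
theorem pvEdges_true_run (ts rest : List Bool) (i : Int) (h : ∀ t ∈ ts, t = true) :
    pvEdges i true (ts ++ rest) = pvEdges (i + ts.length) true rest := by
  induction ts generalizing i with
  | nil => simp
  | cons t ts ih =>
    have ht : t = true := h t (by simp)
    subst ht
    simp only [List.cons_append, pvEdges, if_true, List.length_cons]
    rw [ih _ (fun t ht => h t (by simp [ht]))]
    congr 1
    push_cast
    ring

-- A run of falses is absorbed by pvEdges with incoming flag false.
theorem pvEdges_false_run (ts rest : List Bool) (i : Int) (h : ∀ t ∈ ts, t = false) :
    pvEdges i false (ts ++ rest) = pvEdges (i + ts.length) false rest := by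
  induction ts generalizing i with
  | nil => simp
  | cons t ts ih =>
    have ht : t = false := h t (by simp)
    subst ht
    simp only [List.cons_append, pvEdges, if_neg (by simp : ¬ false = true), List.length_cons]
    rw [ih _ (fun t ht => h t (by simp [ht]))]
    congr 1
    push_cast
    ring

-- The first element surviving dropWhile fails the predicate.
theorem pvDropWhile_head_false {α : Type} (p : α → Bool) :
    ∀ (l : List α) (r : α) (rs : List α), l.dropWhile p = r :: rs → p r = false := by
  intro l
  induction l with
  | nil => intro r rs h; simp [List.dropWhile] at h
  | cons a l ih =>
    intro r rs h
    by_cases ha : p a = true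
    · rw [List.dropWhile_cons_of_pos ha] at h
      exact ih r rs h
    · rw [List.dropWhile_cons_of_neg ha] at h
      cases h
      simpa using ha

-- Main lemma: B's run scan equals A's falling-edge scan.
theorem pvScanRuns_eq_edges_aux : ∀ (n : Nat) (fs : List Bool), fs.length ≤ n →
    ∀ (pos : Int), pvScanRuns pos fs = pvEdges pos false fs := by
  intro n
  induction n with
  | zero =>
    intro fs hfs pos
    have : fs = [] := List.length_eq_zero_iff.mp (Nat.le_zero.mp hfs)
    subst this
    simp [pvScanRuns, pvEdges]
  | succ n ih =>
    intro fs hfs pos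
    match fs with
    | [] => simp [pvScanRuns, pvEdges]
    | f :: gs =>
      have hsplit : gs.takeWhile (fun x => x == f) ++ gs.dropWhile (fun x => x == f) = gs :=
        List.takeWhile_append_dropWhile
      have htwmem : ∀ t ∈ gs.takeWhile (fun x => x == f), t = f := by
        intro t ht
        simpa using List.mem_takeWhile_imp ht
      have hrestlen : (gs.dropWhile (fun x => x == f)).length ≤ n := by
        have h1 : (gs.dropWhile (fun x => x == f)).length ≤ gs.length :=
          List.length_dropWhile_le _ _
        have h2 : gs.length ≤ n := by
          simpa using Nat.lt_succ_iff.mp (Nat.lt_of_lt_of_le (by simp) hfs)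
        omega
      rw [pvScanRuns]
      cases f with
      | true =>
        have h1 : pvEdges pos false (true :: gs) = pvEdges (pos + 1) true gs := by
          simp [pvEdges]
        have h2 : pvEdges (pos + 1) true gs
            = pvEdges (pos + 1 + ((gs.takeWhile (fun x => x == true)).length : Int)) true
                (gs.dropWhile (fun x => x == true)) := by
          conv_lhs => rw [← hsplit]
          exact pvEdges_true_run _ _ (pos + 1) htwmem
        rw [h1, h2]
        cases hr : gs.dropWhile (fun x => x == true) with
        | nil =>
          simp only [List.isEmpty_nil, Bool.not_true, Bool.and_false, if_neg (by simp : ¬ false = true)]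
          rw [ih [] (by simp) _]
          simp [pvEdges]
        | cons r rs =>
          have hrf : r = false := by
            have := pvDropWhile_head_false (fun x => x == true) gs r rs hr
            simpa using this
          subst hrf
          simp only [List.isEmpty_cons, Bool.not_false, Bool.and_true]
          rw [ih (false :: rs) (by rw [← hr]; exact hrestlen) _]
          have h2 : pvEdges (pos + (1 + ((gs.takeWhile (fun x => x == true)).length : Int)))
              false (false :: rs)
            = pvEdges (pos + (1 + ((gs.takeWhile (fun x => x == true)).length : Int)) + 1) false rs := by
            simp [pvEdges]
          rw [h2]
          have h3 : pvEdges (pos + 1 + ((gs.takeWhile (fun x => x == true)).length : Int))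
              true (false :: rs)
            = (pos + 1 + ((gs.takeWhile (fun x => x == true)).length : Int)) ::
              pvEdges (pos + 1 + ((gs.takeWhile (fun x => x == true)).length : Int) + 1) false rs := by
            simp [pvEdges]
          have harith : pos + (1 + ((gs.takeWhile (fun x => x == true)).length : Int))
              = pos + 1 + ((gs.takeWhile (fun x => x == true)).length : Int) := by ring
          rw [harith, if_pos trivial]
          exact h3.symm
      | false =>
        have h1 : pvEdges pos false (false :: gs) = pvEdges (pos + 1) false gs := by
          simp [pvEdges]
        have h2 : pvEdges (pos + 1) false gs
            = pvEdges (pos + 1 + ((gs.takeWhile (fun x => x == false)).length : Int)) false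
                (gs.dropWhile (fun x => x == false)) := by
          conv_lhs => rw [← hsplit]
          exact pvEdges_false_run _ _ (pos + 1) htwmem
        rw [h1, h2]
        simp only [Bool.false_and, if_neg (by simp : ¬ false = true)]
        rw [ih _ hrestlen _]
        ring_nf

theorem pvScanRuns_eq_edges (fs : List Bool) (pos : Int) :
    pvScanRuns pos fs = pvEdges pos false fs :=
  pvScanRuns_eq_edges_aux fs.length fs (Nat.le_refl _) pos

-- ===== VERDICT (by name: the statement is the Claim_ definition above) =====
theorem get_end_of_deletion_indices_spec : Claim_equal_get_end_of_deletion_indices := by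
  intro tags _
  unfold Spec_get_end_of_deletion_indices get_end_of_deletion_indices get_end_of_deletion_indices_alt
  rw [pvA_eq_edges (fun t => PySem.Str.startswith t "-"), pvScanRuns_eq_edges]
  simp
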